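-- pv_equiv track=rewrite | github.com/FBR4Z/aula-linguagens-programacao | 01_lista_string_criptografia.py | criptografar
-- ===== SOURCE A (Python) =====
-- def criptografar(mensagem):
--     # Primeira passada: deslocar caracteres
--     mensagem_deslocada = ''
--     for char in mensagem:
--         if char.isalpha():
--             if char.islower():
--                 char = chr(((ord(char) - ord('a') + 3) % 26) + ord('a'))
--             else:
--                 char = chr(((ord(char) - ord('A') + 3) % 26) + ord('A'))
--         mensagem_deslocada += char
--
--     # Segunda passada: inverter a mensagem
--     mensagem_invertida = mensagem_deslocada[::-1]
--
--     # Terceira passada: deslocar caracteres da metade em diante para a esquerda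
--     metade = len(mensagem_invertida) // 2
--     mensagem_final = ''
--     for i, char in enumerate(mensagem_invertida):
--         if i >= metade:
--             char = chr(ord(char) - 1) if char.isalpha() else char
--         mensagem_final += char
--
--     return mensagem_final
-- ===== SOURCE B (Python) =====
-- # Table-driven: precomputed translation tables + slice decomposition, no per-char loop.
-- # The reversed output's second half (index >= n//2) comes exactly from the original
-- # prefix mensagem[:n - n//2], so: translate the prefix with the shift-then-decrement
-- # table, the suffix with the plain Caesar+3 table, concatenate and reverse once.
-- _SHIFT = {c: chr((ord(c) - ord(a) + 3) % 26 + ord(a))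
--           for a in 'aA' for c in (chr(ord(a) + k) for k in range(26))}
-- _T_SHIFT = str.maketrans(_SHIFT)
-- _T_SHIFT_DEC = str.maketrans({c: chr(ord(s) - 1) for c, s in _SHIFT.items()})
--
-- def criptografar(mensagem):
--     corte = len(mensagem) - len(mensagem) // 2
--     return (mensagem[:corte].translate(_T_SHIFT_DEC)
--             + mensagem[corte:].translate(_T_SHIFT))[::-1]
-- ===== Notes on version B (the rewrite author's own statement) =====
-- stated objective: faster
-- what changed: B replaces A's per-character conditional loops and repeated string concatenation by two precomputed 52-entry translation tables (Caesar+3 and Caesar+3-then-decrement) applied via str.translate to the two slices of the message that land in each half of the reversed output, concatenated and reversed once.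
import Mathlib
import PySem

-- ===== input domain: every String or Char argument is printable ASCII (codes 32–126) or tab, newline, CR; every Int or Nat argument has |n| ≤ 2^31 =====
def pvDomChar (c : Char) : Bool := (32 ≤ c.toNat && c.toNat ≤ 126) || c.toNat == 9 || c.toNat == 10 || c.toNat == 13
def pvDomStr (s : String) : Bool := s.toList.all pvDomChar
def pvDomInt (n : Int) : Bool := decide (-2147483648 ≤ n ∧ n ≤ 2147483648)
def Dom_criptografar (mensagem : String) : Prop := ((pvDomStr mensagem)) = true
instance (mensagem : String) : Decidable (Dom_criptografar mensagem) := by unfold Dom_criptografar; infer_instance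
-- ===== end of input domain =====

-- B replaces A's per-character loops by two precomputed translation tables applied to the two
-- slices of the message that land in each half of the reversed output; same return value.

-- ===== PORT A =====
def criptografar (mensagem : String) : String :=
  let deslocada := mensagem.toList.foldl
    (fun acc char =>
      acc ++ [if PySem.Chars.isalpha char then
                if PySem.Chars.islower char then
                  Char.ofNat (((char.toNat - 97 + 3) % 26) + 97)
                else
                  Char.ofNat (((char.toNat - 65 + 3) % 26) + 65)
              else char]) []
  let invertida := (PySem.List.slice? deslocada none none (-1)).getD []   -- [::-1]
  let metade : Int := (invertida.length : Int) / 2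
  let final := (PySem.List.enumerate invertida).foldl
    (fun acc p =>
      acc ++ [if p.1 ≥ metade then
                (if PySem.Chars.isalpha p.2 then Char.ofNat (p.2.toNat - 1) else p.2)
              else p.2]) []
  String.ofList final

-- ===== PORT B =====
-- _SHIFT = {c: chr((ord(c)-ord(a)+3)%26+ord(a)) for a in 'aA' for c in (chr(ord(a)+k) for k in range(26))}
def pvShiftTable : PySem.Dict Char Char :=
  ['a', 'A'].foldl
    (fun d a =>
      ((List.range 26).map (fun k => Char.ofNat (a.toNat + k))).foldl
        (fun d c => d.insert c (Char.ofNat ((c.toNat - a.toNat + 3) % 26 + a.toNat))) d)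
    PySem.Dict.empty

-- _T_SHIFT_DEC = {c: chr(ord(s) - 1) for c, s in _SHIFT.items()}
def pvShiftDecTable : PySem.Dict Char Char :=
  pvShiftTable.items.foldl
    (fun d p => d.insert p.1 (Char.ofNat (p.2.toNat - 1))) PySem.Dict.empty

-- s.translate(table): each code point mapped through the table, absent keys unchanged
def pvTranslate (t : PySem.Dict Char Char) (s : List Char) : List Char :=
  s.map (fun c => t.getD c c)

def criptografar_alt (mensagem : String) : String :=
  let l := mensagem.toList
  let corte : Int := (l.length : Int) - (l.length : Int) / 2
  String.ofList
    ((pvTranslate pvShiftDecTable (PySem.List.slice l none (some corte))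
      ++ pvTranslate pvShiftTable (PySem.List.slice l (some corte) none)).reverse)

-- ===== PRECONDITION & SPEC =====
def Spec_criptografar (mensagem : String) (out : String) : Prop := out = criptografar_alt mensagem
instance (mensagem : String) (out : String) : Decidable (Spec_criptografar mensagem out) := by unfold Spec_criptografar; infer_instance

-- ===== CLAIM (what is proved, stated in full; the proofs are below) =====
def Claim_equal_criptografar : Prop := ∀ (mensagem : String), Dom_criptografar mensagem → Spec_criptografar mensagem (criptografar mensagem)

-- ===== LEMMAS AND PROOFS =====

-- A's shift step, named for the proofs only
def pvShiftA (char : Char) : Char :=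
  if PySem.Chars.isalpha char then
    if PySem.Chars.islower char then
      Char.ofNat (((char.toNat - 97 + 3) % 26) + 97)
    else
      Char.ofNat (((char.toNat - 65 + 3) % 26) + 65)
  else char

-- On domain chars the shift table computes A's shift step
set_option maxRecDepth 4096 in
theorem table_shift_eq (c : Char) (h : pvDomChar c = true) :
    pvShiftTable.getD c c = pvShiftA c := by
  rw [← Char.ofNat_toNat c]
  have hb : c.toNat ≤ 126 := by simp [pvDomChar] at h; omega
  set n := c.toNat with hn
  clear_value n
  interval_cases n <;> decide

-- On domain chars the dec table computes A's dec-after-shift step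
set_option maxRecDepth 4096 in
theorem table_dec_eq (c : Char) (h : pvDomChar c = true) :
    pvShiftDecTable.getD c c =
      (if PySem.Chars.isalpha (pvShiftA c) then Char.ofNat ((pvShiftA c).toNat - 1)
       else pvShiftA c) := by
  rw [← Char.ofNat_toNat c]
  have hb : c.toNat ≤ 126 := by simp [pvDomChar] at h; omega
  set n := c.toNat with hn
  clear_value n
  interval_cases n <;> decide

theorem criptografar_eq (m : String) (hd : Dom_criptografar m) :
    criptografar m = criptografar_alt m := by
  unfold criptografar criptografar_alt pvTranslate
  simp only [PySem.List.slice?_none_none_neg_one, Option.getD_some,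
    PySem.List.foldl_append_singleton_eq_map, List.nil_append]
  apply congrArg
  have hdom : ∀ c ∈ m.toList, pvDomChar c = true := by
    intro c hcmem
    have h2 := hd
    simp only [Dom_criptografar, pvDomStr, List.all_eq_true] at h2
    exact h2 c hcmem
  have hfA : (fun char => if PySem.Chars.isalpha char = true then
      if PySem.Chars.islower char = true then Char.ofNat (((char.toNat - 97 + 3) % 26) + 97)
      else Char.ofNat (((char.toNat - 65 + 3) % 26) + 65) else char) = pvShiftA := rfl
  rw [hfA]
  set l := m.toList with hl
  set n := l.length with hn
  have hc2 : ((n:Int) - (n:Int)/2).toNat = n - n/2 := by omega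
  rw [PySem.List.slice_to _ (by omega : (0:Int) ≤ (n:Int) - (n:Int)/2),
      PySem.List.slice_from _ (by omega : (0:Int) ≤ (n:Int) - (n:Int)/2), hc2]
  have hta : (l.take (n - n/2)).length = n - n/2 := by simp [hn]
  have htb : (l.drop (n - n/2)).length = n/2 := by simp [hn]; omega
  have hAB : ((l.take (n - n/2)).map (fun c => pvShiftDecTable.getD c c) ++
      (l.drop (n - n/2)).map (fun c => pvShiftTable.getD c c)).length = n := by
    simp; omega
  apply List.ext_getElem?
  intro i
  by_cases hi : i < n
  · -- both sides are defined; compare the values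
    have hRHS : ((l.take (n - n/2)).map (fun c => pvShiftDecTable.getD c c) ++
        (l.drop (n - n/2)).map (fun c => pvShiftTable.getD c c)).reverse[i]? =
        ((l.take (n - n/2)).map (fun c => pvShiftDecTable.getD c c) ++
        (l.drop (n - n/2)).map (fun c => pvShiftTable.getD c c))[n - 1 - i]? := by
      rw [List.getElem?_reverse (by rw [hAB]; exact hi), hAB]
    rw [hRHS, List.getElem?_map, PySem.List.getElem?_enumerate,
        List.getElem?_reverse (by simpa [hn] : i < (l.map pvShiftA).length),
        List.length_map, ← hn, List.getElem?_map]
    obtain ⟨c, hc⟩ : ∃ c, l[n - 1 - i]? = some c :=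
      ⟨_, List.getElem?_eq_getElem (by omega)⟩
    have hcmem : c ∈ l := List.mem_of_getElem? hc
    by_cases hcase : n/2 ≤ i
    · -- second half of the output ← decremented prefix of l
      rw [List.getElem?_append_left
          (by simp; omega : n - 1 - i < ((l.take (n - n/2)).map (fun c => pvShiftDecTable.getD c c)).length),
          List.getElem?_map, List.getElem?_take_of_lt (by omega), hc]
      have hcond : ((0:Int) + (i:Int) ≥ (((l.map pvShiftA).reverse.length) : Int)/2) := by
        simp only [List.length_reverse, List.length_map, ← hn]; omega
      simp only [Option.map_some, Option.some.injEq]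
      rw [if_pos hcond, table_dec_eq c (hdom c hcmem)]
    · -- first half of the output ← shifted suffix of l
      rw [List.getElem?_append_right
          (by simp; omega : ((l.take (n - n/2)).map (fun c => pvShiftDecTable.getD c c)).length ≤ n - 1 - i),
          List.getElem?_map, List.getElem?_drop]
      have hidx : n - n/2 + (n - 1 - i - ((l.take (n - n/2)).map (fun c => pvShiftDecTable.getD c c)).length) = n - 1 - i := by
        simp; omega
      rw [hidx, hc]
      have hcond : ¬ ((0:Int) + (i:Int) ≥ (((l.map pvShiftA).reverse.length) : Int)/2) := by
        simp only [List.length_reverse, List.length_map, ← hn]; omega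
      simp only [Option.map_some, Option.some.injEq]
      rw [if_neg hcond, table_shift_eq c (hdom c hcmem)]
  · -- out of range on both sides
    rw [List.getElem?_eq_none, List.getElem?_eq_none]
    · simp; omega
    · simp [PySem.List.length_enumerate]; omega

-- ===== VERDICT (by name: the statement is the Claim_ definition above) =====
theorem criptografar_spec : Claim_equal_criptografar := by
  intro m hd
  unfold Spec_criptografar
  exact criptografar_eq m hd
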